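-- pv_equiv track=rewrite | github.com/davidiach/erdos97 | scripts/check_n9_base_apex_low_excess_ledgers.py | turn_clauses_from_saturation
-- ===== SOURCE A (Python) =====
-- from typing import Any, Iterable, Sequence
--
-- def turn_clauses_from_saturation(
--     n: int,
--     saturated_length2: Iterable[int],
--     saturated_length3: Iterable[int],
-- ) -> tuple[tuple[int, int], ...]:
--     """Return turn-cover clauses forced by length-2 and length-3 saturation."""
--
--     saturated2 = {index % n for index in saturated_length2}
--     saturated3 = {index % n for index in saturated_length3}
--     clauses = []
--     for index in range(n):
--         if index in saturated3 and index in saturated2 and (index + 1) % n in saturated2: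
--             clauses.append(((index + 1) % n, (index + 2) % n))
--     return tuple(clauses)
-- ===== SOURCE B (Python) =====
-- def turn_clauses_from_saturation(n, saturated_length2, saturated_length3):
--     """Return turn-cover clauses forced by length-2 and length-3 saturation."""
--     # Residue sets encoded as integer bitmasks; the per-index triple condition of the
--     # naive scan becomes two bitwise ANDs with a rotated mask, then set bits are read
--     # off in ascending order.
--     mask2 = 0
--     for index in saturated_length2:
--         mask2 |= 1 << (index % n)
--     mask3 = 0
--     for index in saturated_length3:
--         mask3 |= 1 << (index % n)
--     full = (1 << n) - 1
--     rot2 = ((mask2 >> 1) | (mask2 << (n - 1))) & full  # bit i set iff (i+1) % n in mask2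
--     hits = mask2 & mask3 & rot2
--     clauses = []
--     index = 0
--     while hits:
--         if hits & 1:
--             clauses.append(((index + 1) % n, (index + 2) % n))
--         hits >>= 1
--         index += 1
--     return tuple(clauses)
-- ===== Notes on version B (the rewrite author's own statement) =====
-- stated objective: alternative
-- what changed: B encodes the residue sets as integer bitmasks and computes all clause positions at once as mask2 & mask3 & rotate(mask2,1), then reads the set bits off ascending, instead of scanning range(n) and testing three set memberships per index.
-- outside the precondition, e.g. on turn_clauses_from_saturation(-2, [1, 0], [1]): A returns (), B raises ValueError; on turn_clauses_from_saturation(0, [], []): A returns (), B raises ValueError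
import Mathlib
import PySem

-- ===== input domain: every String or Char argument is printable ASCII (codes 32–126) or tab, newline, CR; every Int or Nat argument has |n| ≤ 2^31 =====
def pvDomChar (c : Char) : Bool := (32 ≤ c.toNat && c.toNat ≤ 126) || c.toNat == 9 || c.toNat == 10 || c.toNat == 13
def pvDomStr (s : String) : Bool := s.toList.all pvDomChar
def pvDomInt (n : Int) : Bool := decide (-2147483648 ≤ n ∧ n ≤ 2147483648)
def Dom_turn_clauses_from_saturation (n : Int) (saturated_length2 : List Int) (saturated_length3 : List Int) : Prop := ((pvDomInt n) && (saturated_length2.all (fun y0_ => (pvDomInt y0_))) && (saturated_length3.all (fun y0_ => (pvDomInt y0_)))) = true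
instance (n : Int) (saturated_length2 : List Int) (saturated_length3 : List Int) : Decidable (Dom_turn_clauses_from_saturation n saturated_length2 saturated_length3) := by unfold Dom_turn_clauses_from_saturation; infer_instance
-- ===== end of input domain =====

-- B replaces the range(n) scan with three membership tests per index by integer
-- bitmasks: the clause positions are computed at once as mask2 & mask3 & rotate(mask2, 1)
-- and the set bits are then read off in ascending order.

-- ===== PORT A =====
def turn_clauses_from_saturation (n : Int) (saturated_length2 : List Int) (saturated_length3 : List Int) : List (Int × Int) :=
  let saturated2 : PySem.Set Int := PySem.Set.ofList (saturated_length2.map (fun index => PySem.Int.mod index n))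
  let saturated3 : PySem.Set Int := PySem.Set.ofList (saturated_length3.map (fun index => PySem.Int.mod index n))
  (PySem.List.pyRange 0 n 1).foldl
    (fun clauses index =>
      if PySem.Set.contains saturated3 index && PySem.Set.contains saturated2 index &&
         PySem.Set.contains saturated2 (PySem.Int.mod (index + 1) n) then
        clauses ++ [(PySem.Int.mod (index + 1) n, PySem.Int.mod (index + 2) n)]
      else clauses) []

-- ===== PORT B =====
-- 'while hits: if hits & 1: …; hits >>= 1; index += 1' (the bit-reading loop of Source B)
def pvAltBitLoop (n : Int) (hits : Nat) (index : Int) (clauses : List (Int × Int)) : List (Int × Int) :=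
  if h0 : hits = 0 then clauses
  else pvAltBitLoop n (hits >>> 1) (index + 1)
    (if hits &&& 1 = 1 then clauses ++ [(PySem.Int.mod (index + 1) n, PySem.Int.mod (index + 2) n)] else clauses)
termination_by hits
decreasing_by
  rw [Nat.shiftRight_one]
  exact Nat.div_lt_self (Nat.pos_of_ne_zero h0) one_lt_two

-- '.toNat' on the shift amounts is exact under Pre_ (n ≥ 1): 'index % n' and 'n - 1'
-- are then the nonnegative values Python shifts by (Python raises on a negative shift).
def turn_clauses_from_saturation_alt (n : Int) (saturated_length2 : List Int) (saturated_length3 : List Int) : List (Int × Int) :=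
  let mask2 : Nat := saturated_length2.foldl (fun m index => m ||| (1 <<< (PySem.Int.mod index n).toNat)) 0
  let mask3 : Nat := saturated_length3.foldl (fun m index => m ||| (1 <<< (PySem.Int.mod index n).toNat)) 0
  let full : Nat := (1 <<< n.toNat) - 1
  let rot2 : Nat := ((mask2 >>> 1) ||| (mask2 <<< (n - 1).toNat)) &&& full
  let hits : Nat := mask2 &&& mask3 &&& rot2
  pvAltBitLoop n hits 0 []

-- ===== PRECONDITION & SPEC =====
-- Pre_ restricts to the natural domain n ≥ 1: for n = 0 A raises ZeroDivisionError on any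
-- nonempty input (and B's shift by n-1 raises ValueError on the empty one), and for n < 0
-- A's empty result is an artefact of range(n) being empty while the mod-n residue sets are
-- still formed; B's negative shift amounts raise ValueError there.
def Pre_turn_clauses_from_saturation (n : Int) (saturated_length2 : List Int) (saturated_length3 : List Int) : Prop := 1 ≤ n
instance (n : Int) (saturated_length2 : List Int) (saturated_length3 : List Int) : Decidable (Pre_turn_clauses_from_saturation n saturated_length2 saturated_length3) := by unfold Pre_turn_clauses_from_saturation; infer_instance
def pvWitness_turn_clauses_from_saturation : Int × List Int × List Int := (7, [0, 1, 2, 9], [1, 2, 3])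
def Spec_turn_clauses_from_saturation (n : Int) (saturated_length2 : List Int) (saturated_length3 : List Int) (out : List (Int × Int)) : Prop := out = turn_clauses_from_saturation_alt n saturated_length2 saturated_length3
instance (n : Int) (saturated_length2 : List Int) (saturated_length3 : List Int) (out : List (Int × Int)) : Decidable (Spec_turn_clauses_from_saturation n saturated_length2 saturated_length3 out) := by unfold Spec_turn_clauses_from_saturation; infer_instance

-- ===== CLAIM (what is proved, stated in full; the proofs are below) =====
def Claim_equal_turn_clauses_from_saturation : Prop := ∀ (n : Int) (saturated_length2 : List Int) (saturated_length3 : List Int), Dom_turn_clauses_from_saturation n saturated_length2 saturated_length3 → Pre_turn_clauses_from_saturation n saturated_length2 saturated_length3 → Spec_turn_clauses_from_saturation n saturated_length2 saturated_length3 (turn_clauses_from_saturation n saturated_length2 saturated_length3)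

-- ===== LEMMAS AND PROOFS =====

-- The bitmask built by B's fold, as a named abbreviation for the proofs.
def pvMask (n : Int) (l : List Int) : Nat :=
  l.foldl (fun m index => m ||| (1 <<< (PySem.Int.mod index n).toNat)) 0

theorem pvMask_testBit_aux (n : Int) (l : List Int) : ∀ (m : Nat) (j : Nat),
    (l.foldl (fun m index => m ||| (1 <<< (PySem.Int.mod index n).toNat)) m).testBit j
      = (m.testBit j || l.any (fun i => decide ((PySem.Int.mod i n).toNat = j))) := by
  induction l with
  | nil => intro m j; simp
  | cons a l ih =>
      intro m j
      rw [List.foldl_cons, ih, Nat.testBit_or, Nat.one_shiftLeft, Nat.testBit_two_pow,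
        List.any_cons]
      cases m.testBit j <;> cases decide ((PySem.Int.mod a n).toNat = j) <;> simp

theorem pvMask_testBit (n : Int) (l : List Int) (j : Nat) :
    (pvMask n l).testBit j = l.any (fun i => decide ((PySem.Int.mod i n).toNat = j)) := by
  rw [pvMask, pvMask_testBit_aux]
  simp

-- Every set bit of a mask is a residue index below n.
theorem pvMask_bound (n : Int) (hn : 1 ≤ n) (l : List Int) (j : Nat)
    (h : (pvMask n l).testBit j = true) : j < n.toNat := by
  rw [pvMask_testBit, List.any_eq_true] at h
  obtain ⟨i, _, hi⟩ := h
  have h1 : 0 ≤ PySem.Int.mod i n := PySem.Int.mod_nonneg i (by omega)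
  have h2 : PySem.Int.mod i n < n := PySem.Int.mod_lt i (by omega)
  simp only [decide_eq_true_eq] at hi
  omega

-- Membership in A's residue set is the corresponding bit of B's mask.
theorem pvContains_eq_mask (n : Int) (hn : 1 ≤ n) (l : List Int) (x : Int) (hx : 0 ≤ x) :
    PySem.Set.contains (PySem.Set.ofList (l.map (fun i => PySem.Int.mod i n))) x
      = (pvMask n l).testBit x.toNat := by
  rw [Bool.eq_iff_iff, PySem.Set.contains_iff, PySem.Set.mem_ofList, List.mem_map,
    pvMask_testBit, List.any_eq_true]
  constructor
  · rintro ⟨i, hi, rfl⟩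
    exact ⟨i, hi, by simp⟩
  · rintro ⟨i, hi, h⟩
    simp only [decide_eq_true_eq] at h
    have h1 : 0 ≤ PySem.Int.mod i n := PySem.Int.mod_nonneg i (by omega)
    refine ⟨i, hi, ?_⟩
    omega

-- The rotated mask: bit j of ((m >> 1) | (m << (N-1))) & (2^N - 1) is bit (j+1) % N of m.
theorem pvRot_bit (N : Nat) (hN : 1 ≤ N) (m : Nat) (hb : ∀ k, m.testBit k = true → k < N)
    (j : Nat) (hj : j < N) :
    (((m >>> 1) ||| (m <<< (N - 1))) &&& (2 ^ N - 1)).testBit j = m.testBit ((j + 1) % N) := by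
  by_cases hcase : j < N - 1
  · have h1 : (j + 1) % N = j + 1 := Nat.mod_eq_of_lt (by omega)
    have h2 : ¬ (j ≥ N - 1) := by omega
    simp [Nat.testBit_and, Nat.testBit_or, Nat.testBit_shiftLeft, Nat.testBit_shiftRight,
      Nat.testBit_two_pow_sub_one, h1, h2, hj, Nat.add_comm 1 j]
  · have hjN : j = N - 1 := by omega
    subst hjN
    have h1 : (N - 1 + 1) % N = 0 := by
      have : N - 1 + 1 = N := by omega
      rw [this, Nat.mod_self]
    have h2 : 1 + (N - 1) = N := by omega
    have h3 : m.testBit N = false := by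
      cases h : m.testBit N
      · rfl
      · exact absurd (hb N h) (lt_irrefl N)
    simp [Nat.testBit_and, Nat.testBit_or, Nat.testBit_shiftLeft, Nat.testBit_shiftRight,
      Nat.testBit_two_pow_sub_one, h1, h2, h3, hj]

-- Ascending list of the set-bit positions of h (proof-side mirror of the bit-reading loop).
def pvBits (h : Nat) : List Nat :=
  if h = 0 then [] else (if h % 2 = 1 then [0] else []) ++ (pvBits (h / 2)).map (· + 1)
termination_by h
decreasing_by exact Nat.div_lt_self (Nat.pos_of_ne_zero (by assumption)) one_lt_two

theorem pvBits_mem (h : Nat) : ∀ j, j ∈ pvBits h ↔ h.testBit j = true := by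
  induction h using Nat.strong_induction_on with
  | _ h ih =>
    intro j
    rw [pvBits]
    by_cases h0 : h = 0
    · simp [h0]
    · have hlt : h / 2 < h := Nat.div_lt_self (Nat.pos_of_ne_zero h0) one_lt_two
      simp only [h0, if_false, List.mem_append, List.mem_map]
      cases j with
      | zero =>
          by_cases hp : h % 2 = 1 <;> simp [hp, Nat.testBit_zero]
      | succ k =>
          rw [Nat.testBit_add_one]
          constructor
          · rintro (hmem | ⟨b, hb, hbk⟩)
            · by_cases hp : h % 2 = 1 <;> simp [hp] at hmem
            · have hb' := (ih (h / 2) hlt b).mp hb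
              have hbk' : b = k := by omega
              rw [← hbk']
              exact hb'
          · intro hbit
            exact Or.inr ⟨k, (ih (h / 2) hlt k).mpr hbit, rfl⟩

theorem pvBits_sorted (h : Nat) : (pvBits h).Pairwise (· < ·) := by
  induction h using Nat.strong_induction_on with
  | _ h ih =>
    rw [pvBits]
    by_cases h0 : h = 0
    · simp [h0]
    · have hlt : h / 2 < h := Nat.div_lt_self (Nat.pos_of_ne_zero h0) one_lt_two
      simp only [h0, if_false]
      rw [List.pairwise_append]
      refine ⟨?_, ?_, ?_⟩
      · by_cases hp : h % 2 = 1 <;> simp [hp]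
      · rw [List.pairwise_map]
        exact (ih (h / 2) hlt).imp (by omega)
      · intro a ha b hb
        have hb' : ∃ c, c + 1 = b := by
          rw [List.mem_map] at hb
          obtain ⟨c, _, rfl⟩ := hb
          exact ⟨c, rfl⟩
        by_cases hp : h % 2 = 1 <;> simp [hp] at ha
        obtain ⟨c, rfl⟩ := hb'
        omega

-- The bit-reading loop appends one clause per set bit, lowest bit first.
theorem pvAltBitLoop_eq (n : Int) : ∀ (h : Nat) (idx : Int) (acc : List (Int × Int)),
    pvAltBitLoop n h idx acc
      = acc ++ (pvBits h).map
          (fun j : Nat => (PySem.Int.mod (idx + (j : Int) + 1) n, PySem.Int.mod (idx + (j : Int) + 2) n)) := by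
  intro h
  induction h using Nat.strong_induction_on with
  | _ h ih =>
    intro idx acc
    rw [pvAltBitLoop, pvBits]
    by_cases h0 : h = 0
    · simp [h0]
    · have hlt : h / 2 < h := Nat.div_lt_self (Nat.pos_of_ne_zero h0) one_lt_two
      rw [dif_neg h0, if_neg h0, Nat.shiftRight_one, Nat.and_one_is_mod, ih (h / 2) hlt,
        List.map_append]
      have hmap : List.map
            (fun j : Nat => (PySem.Int.mod (idx + (j : Int) + 1) n, PySem.Int.mod (idx + (j : Int) + 2) n))
            ((pvBits (h / 2)).map (· + 1))
          = List.map
            (fun j : Nat => (PySem.Int.mod ((idx + 1) + (j : Int) + 1) n, PySem.Int.mod ((idx + 1) + (j : Int) + 2) n))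
            (pvBits (h / 2)) := by
        rw [List.map_map]
        apply List.map_congr_left
        intro j _
        simp only [Function.comp_apply, Nat.cast_add, Nat.cast_one]
        have e1 : idx + ((j : Int) + 1) + 1 = idx + 1 + (j : Int) + 1 := by ring
        have e2 : idx + ((j : Int) + 1) + 2 = idx + 1 + (j : Int) + 2 := by ring
        rw [e1, e2]
      rw [hmap]
      by_cases hp : h % 2 = 1
      · rw [if_pos hp, if_pos hp]
        simp only [List.map_cons, List.map_nil, Nat.cast_zero, add_zero, List.append_assoc,
          List.singleton_append, List.cons_append, List.nil_append]
      · rw [if_neg hp, if_neg hp, List.map_nil, List.nil_append]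

-- The list of set bits of 'hits', cast to Int, IS A's filtered range(n).
theorem pvKey (n : Int) (hn : 1 ≤ n) (s2l s3l : List Int) :
    ((PySem.List.pyRange 0 n 1).filter
        (fun index =>
          PySem.Set.contains (PySem.Set.ofList (s3l.map (fun i => PySem.Int.mod i n))) index &&
          PySem.Set.contains (PySem.Set.ofList (s2l.map (fun i => PySem.Int.mod i n))) index &&
          PySem.Set.contains (PySem.Set.ofList (s2l.map (fun i => PySem.Int.mod i n)))
            (PySem.Int.mod (index + 1) n)))
      = (pvBits (pvMask n s2l &&& pvMask n s3l &&&
            (((pvMask n s2l >>> 1) ||| (pvMask n s2l <<< (n - 1).toNat)) &&&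
              ((1 <<< n.toNat) - 1)))).map (fun j : Nat => (j : Int)) := by
  set N := n.toNat with hNdef
  have hnN : n = (N : Int) := by omega
  have hN1 : 1 ≤ N := by omega
  set m2 := pvMask n s2l with hm2
  set m3 := pvMask n s3l with hm3
  set hits := m2 &&& m3 &&& (((m2 >>> 1) ||| (m2 <<< (n - 1).toNat)) &&& ((1 <<< N) - 1)) with hhits
  have hfull : (1 <<< N : Nat) - 1 = 2 ^ N - 1 := by rw [Nat.one_shiftLeft]
  have hsh : (n - 1).toNat = N - 1 := by omega
  have hcond : ∀ j : Nat, j < N →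
      hits.testBit j
        = (PySem.Set.contains (PySem.Set.ofList (s3l.map (fun i => PySem.Int.mod i n))) (j : Int) &&
           PySem.Set.contains (PySem.Set.ofList (s2l.map (fun i => PySem.Int.mod i n))) (j : Int) &&
           PySem.Set.contains (PySem.Set.ofList (s2l.map (fun i => PySem.Int.mod i n)))
             (PySem.Int.mod ((j : Int) + 1) n)) := by
    intro j hj
    have hnext : PySem.Int.mod ((j : Int) + 1) n = (((j + 1) % N : Nat) : Int) := by
      rw [hnN]
      rw [show ((j : Int) + 1) = ((j + 1 : Nat) : Int) by push_cast; ring]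
      exact PySem.Int.mod_natCast (j + 1) N
    rw [hhits, Nat.testBit_and, Nat.testBit_and, hfull, hsh,
      pvRot_bit N hN1 m2 (fun k hk => pvMask_bound n hn s2l k hk) j hj]
    rw [pvContains_eq_mask n hn s3l (j : Int) (Int.natCast_nonneg j),
      pvContains_eq_mask n hn s2l (j : Int) (Int.natCast_nonneg j),
      pvContains_eq_mask n hn s2l _ (by rw [hnext]; exact Int.natCast_nonneg _)]
    rw [hnext]
    simp only [Int.toNat_natCast]
    cases m2.testBit j <;> cases m3.testBit j <;> cases m2.testBit ((j + 1) % N) <;> simp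
  have hbound : ∀ j : Nat, hits.testBit j = true → j < N := by
    intro j hj
    rw [hhits, Nat.testBit_and, Nat.testBit_and, Bool.and_eq_true, Bool.and_eq_true] at hj
    exact pvMask_bound n hn s2l j hj.1.1
  apply Eq.symm
  apply List.eq_of_perm_of_sorted (le := fun a b : Int => a < b)
    (fun a b _ _ hab hba => absurd hba (lt_asymm hab))
  · rw [List.pairwise_map]
    exact (pvBits_sorted hits).imp (fun h => by exact_mod_cast h)
  · exact List.Pairwise.filter _ (PySem.List.pairwise_lt_pyRange_one 0 n)
  · rw [List.perm_ext_iff_of_nodup]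
    · intro x
      rw [List.mem_filter, List.mem_map, PySem.List.mem_pyRange_one]
      constructor
      · rintro ⟨j, hjmem, rfl⟩
        rw [pvBits_mem] at hjmem
        have hjN : j < N := hbound j hjmem
        refine ⟨⟨Int.natCast_nonneg j, by omega⟩, ?_⟩
        rw [← hcond j hjN]
        exact hjmem
      · rintro ⟨⟨hx0, hxn⟩, hc⟩
        refine ⟨x.toNat, ?_, by omega⟩
        rw [pvBits_mem]
        have hxN : x.toNat < N := by omega
        rw [hcond x.toNat hxN]
        rw [show ((x.toNat : Nat) : Int) = x by omega]
        exact hc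
    · rw [List.nodup_map_iff (fun a b h => by exact_mod_cast h)]
      exact (pvBits_sorted hits).imp (fun h => by omega)
    · exact List.Nodup.filter _ (PySem.List.nodup_pyRange_one 0 n)

theorem turn_clauses_agree (n : Int) (hn : 1 ≤ n) (s2l s3l : List Int) :
    turn_clauses_from_saturation n s2l s3l = turn_clauses_from_saturation_alt n s2l s3l := by
  unfold turn_clauses_from_saturation turn_clauses_from_saturation_alt
  simp only []
  rw [PySem.List.foldl_append_if
        (fun index =>
          PySem.Set.contains (PySem.Set.ofList (s3l.map (fun i => PySem.Int.mod i n))) index &&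
          PySem.Set.contains (PySem.Set.ofList (s2l.map (fun i => PySem.Int.mod i n))) index &&
          PySem.Set.contains (PySem.Set.ofList (s2l.map (fun i => PySem.Int.mod i n)))
            (PySem.Int.mod (index + 1) n))
        (fun index => (PySem.Int.mod (index + 1) n, PySem.Int.mod (index + 2) n))]
  rw [pvAltBitLoop_eq]
  rw [show (s2l.foldl (fun m index => m ||| (1 <<< (PySem.Int.mod index n).toNat)) 0) = pvMask n s2l from rfl,
      show (s3l.foldl (fun m index => m ||| (1 <<< (PySem.Int.mod index n).toNat)) 0) = pvMask n s3l from rfl]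
  rw [pvKey n hn s2l s3l]
  rw [List.map_map, List.nil_append]
  apply List.map_congr_left
  intro j _
  simp only [Function.comp_apply, zero_add]

-- ===== VERDICT (by name: the statement is the Claim_ definition above) =====
theorem turn_clauses_from_saturation_spec : Claim_equal_turn_clauses_from_saturation := by
  intro n s2l s3l _ hpre
  exact turn_clauses_agree n hpre s2l s3l
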